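-- pv_equiv track=rewrite | github.com/ReactionMechanismGenerator/ARC | arc/job/adapters/qchem.py | generate_scan_angles
-- ===== SOURCE A (Python) =====
-- def generate_scan_angles(req_angle: int, step: int) -> (int, int):
--
--     # Convert the req angle if it is greater than 180 or less than -180
--     if req_angle > 180:
--         req_angle = req_angle - 360
--
--     # This function converts the angles to be within the range of -180 to 180
--     convert_angle = lambda angle: angle % 360 if angle >= 0 else ( angle % 360 if angle <= -180 else (angle % 360) - 360)
--
--     req_angle = convert_angle(req_angle)
--
--     start_angle = -180
--     end_angle = 180
--
--     new_start_angle = req_angle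
--     while new_start_angle - step >= start_angle:
--         new_start_angle -= step
--
--     new_end_angle = req_angle
--     while new_end_angle + step <= end_angle:
--         new_end_angle += step
--
--     return new_start_angle, new_end_angle
-- ===== SOURCE B (Python) =====
-- def generate_scan_angles(req_angle: int, step: int) -> (int, int):
--     # Normalize exactly as A does: one -360 shift for angles above 180,
--     # then Python-mod into [0, 360) unless already strictly inside (-180, 0).
--     if req_angle > 180:
--         req_angle -= 360
--     if not (-180 < req_angle < 0):
--         req_angle %= 360
--     # Closed forms replacing the two step-wise loops.
--     new_start_angle = req_angle - ((req_angle + 180) // step) * step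
--     new_end_angle = req_angle + max(0, (180 - req_angle) // step) * step
--     return new_start_angle, new_end_angle
-- ===== Notes on version B (the rewrite author's own statement) =====
-- stated objective: simpler
-- what changed: Both step-wise while-loops are replaced by O(1) floor-division closed forms (start = req - ((req+180)//step)*step, end = req + max(0,(180-req)//step)*step), and the convert_angle lambda's three-way branch is collapsed into a single mod with one guard.
import Mathlib
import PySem

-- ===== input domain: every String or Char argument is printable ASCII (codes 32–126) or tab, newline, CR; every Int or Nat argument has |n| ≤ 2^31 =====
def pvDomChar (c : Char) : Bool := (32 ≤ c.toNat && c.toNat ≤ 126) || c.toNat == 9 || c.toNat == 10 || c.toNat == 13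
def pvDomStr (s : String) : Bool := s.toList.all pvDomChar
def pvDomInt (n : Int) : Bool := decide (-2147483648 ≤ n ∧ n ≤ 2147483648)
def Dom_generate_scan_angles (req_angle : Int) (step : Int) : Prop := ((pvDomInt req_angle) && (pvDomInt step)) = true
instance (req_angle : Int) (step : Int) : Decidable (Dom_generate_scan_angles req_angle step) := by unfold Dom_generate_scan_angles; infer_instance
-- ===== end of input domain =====

-- B replaces A's two step-wise while-loops by O(1) floor-division closed forms (objective: simpler).

-- ===== PORT A =====
-- `while new_start_angle - step >= -180: new_start_angle -= step`; fuel only makes the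
-- recursion total (the loop runs at most 540 times whenever step ≥ 1, see Pre_).
def pvDownLoop (val : Int) (step : Int) : Nat → Int
  | 0 => val
  | fuel + 1 => if val - step ≥ -180 then pvDownLoop (val - step) step fuel else val

-- `while new_end_angle + step <= 180: new_end_angle += step`
def pvUpLoop (val : Int) (step : Int) : Nat → Int
  | 0 => val
  | fuel + 1 => if val + step ≤ 180 then pvUpLoop (val + step) step fuel else val

-- the `convert_angle` lambda, branch for branch
def pvConvertAngle (angle : Int) : Int :=
  if angle ≥ 0 then PySem.Int.mod angle 360
  else if angle ≤ -180 then PySem.Int.mod angle 360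
  else PySem.Int.mod angle 360 - 360

def generate_scan_angles (req_angle : Int) (step : Int) : Int × Int :=
  let r := if req_angle > 180 then req_angle - 360 else req_angle
  let r := pvConvertAngle r
  (pvDownLoop r step 1000, pvUpLoop r step 1000)

-- ===== PORT B =====
def generate_scan_angles_alt (req_angle : Int) (step : Int) : Int × Int :=
  let r := if req_angle > 180 then req_angle - 360 else req_angle
  let r := if -180 < r ∧ r < 0 then r else PySem.Int.mod r 360
  (r - PySem.Int.floordiv (r + 180) step * step,
   r + max 0 (PySem.Int.floordiv (180 - r) step) * step)

-- ===== PRECONDITION & SPEC =====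
-- Pre_ excludes step ≤ 0: there Python A never returns (both while-loops spin forever,
-- or B's floor division raises ZeroDivisionError at step = 0).
def Pre_generate_scan_angles (req_angle : Int) (step : Int) : Prop := 1 ≤ step
instance (req_angle : Int) (step : Int) : Decidable (Pre_generate_scan_angles req_angle step) := by unfold Pre_generate_scan_angles; infer_instance
def pvWitness_generate_scan_angles : Int × Int := (90, 30)

def Spec_generate_scan_angles (req_angle : Int) (step : Int) (out : Int × Int) : Prop := out = generate_scan_angles_alt req_angle step
instance (req_angle : Int) (step : Int) (out : Int × Int) : Decidable (Spec_generate_scan_angles req_angle step out) := by unfold Spec_generate_scan_angles; infer_instance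

-- ===== CLAIM (what is proved, stated in full; the proofs are below) =====
def Claim_equal_generate_scan_angles : Prop := ∀ (req_angle : Int) (step : Int), Dom_generate_scan_angles req_angle step → Pre_generate_scan_angles req_angle step → Spec_generate_scan_angles req_angle step (generate_scan_angles req_angle step)

-- ===== LEMMAS AND PROOFS =====

lemma pvDownLoop_eq (fuel : Nat) (n step : Int) (hs : 1 ≤ step) (h0 : -180 ≤ n)
    (hf : n + 180 < fuel) :
    pvDownLoop n step fuel = n - (n + 180) / step * step := by
  induction fuel generalizing n with
  | zero => omega
  | succ f ih =>
    rw [pvDownLoop]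
    by_cases h : n - step ≥ -180
    · rw [if_pos h, ih (n - step) (by omega) (by omega)]
      have : n + 180 = (n - step + 180) + 1 * step := by ring
      rw [this, Int.add_mul_ediv_right _ _ (by omega : step ≠ 0)]
      ring
    · rw [if_neg h, Int.ediv_eq_zero_of_lt (by omega) (by omega)]
      ring

lemma pvUpLoop_eq (fuel : Nat) (n step : Int) (hs : 1 ≤ step)
    (hf : 180 - n < fuel) :
    pvUpLoop n step fuel = n + max 0 ((180 - n) / step) * step := by
  induction fuel generalizing n with
  | zero =>
    have hlt : (180 - n) / step < 0 := Int.ediv_neg_of_neg_of_pos (by omega) (by omega)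
    rw [pvUpLoop, max_eq_left (by omega)]
    ring
  | succ f ih =>
    rw [pvUpLoop]
    by_cases h : n + step ≤ 180
    · rw [if_pos h, ih (n + step) (by omega)]
      have h1 : 0 ≤ (180 - (n + step)) / step := Int.ediv_nonneg (by omega) (by omega)
      have h2 : 180 - n = (180 - (n + step)) + 1 * step := by ring
      have h3 : (180 - n) / step = (180 - (n + step)) / step + 1 := by
        rw [h2, Int.add_mul_ediv_right _ _ (by omega : step ≠ 0)]
      rw [h3, max_eq_right h1, max_eq_right (by omega)]
      ring
    · rw [if_neg h]
      by_cases hle : 0 ≤ 180 - n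
      · rw [Int.ediv_eq_zero_of_lt hle (by omega)]
        simp
      · have : (180 - n) / step < 0 := Int.ediv_neg_of_neg_of_pos (by omega) (by omega)
        rw [max_eq_left (by omega)]
        ring

lemma pvConvertAngle_eq (r : Int) :
    pvConvertAngle r = if -180 < r ∧ r < 0 then r else PySem.Int.mod r 360 := by
  unfold pvConvertAngle
  have hm : PySem.Int.mod r 360 = r % 360 := PySem.Int.mod_eq_emod_of_pos (by omega)
  by_cases h : -180 < r ∧ r < 0
  · rw [if_pos h, if_neg (by omega), if_neg (by omega), hm]
    omega
  · rw [if_neg h]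
    by_cases h1 : r ≥ 0
    · rw [if_pos h1]
    · rw [if_neg h1, if_pos (by omega)]

lemma pvConvertAngle_bounds (r : Int) :
    -180 ≤ pvConvertAngle r ∧ pvConvertAngle r < 360 := by
  rw [pvConvertAngle_eq]
  have h1 : 0 ≤ PySem.Int.mod r 360 := PySem.Int.mod_nonneg r (by omega)
  have h2 : PySem.Int.mod r 360 < 360 := PySem.Int.mod_lt r (by omega)
  by_cases h : -180 < r ∧ r < 0
  · rw [if_pos h]; omega
  · rw [if_neg h]; omega

-- ===== VERDICT (by name: the statement is the Claim_ definition above) =====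
lemma pvScanPair_eq (n step : Int) (hs : 1 ≤ step) (hn1 : -180 ≤ n) (hn2 : n < 360) :
    (pvDownLoop n step 1000, pvUpLoop n step 1000) =
      (n - PySem.Int.floordiv (n + 180) step * step,
       n + max 0 (PySem.Int.floordiv (180 - n) step) * step) := by
  have hpos : (0 : Int) < step := by omega
  rw [PySem.Int.floordiv_eq_ediv_of_pos hpos, PySem.Int.floordiv_eq_ediv_of_pos hpos,
      pvDownLoop_eq 1000 n step hs (by omega) (by omega),
      pvUpLoop_eq 1000 n step hs (by omega)]

theorem generate_scan_angles_spec : Claim_equal_generate_scan_angles := by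
  intro req_angle step _ hpre
  unfold Spec_generate_scan_angles generate_scan_angles generate_scan_angles_alt
  have hs : 1 ≤ step := hpre
  set a := if req_angle > 180 then req_angle - 360 else req_angle with ha
  have hb := pvConvertAngle_bounds a
  show (pvDownLoop (pvConvertAngle a) step 1000, pvUpLoop (pvConvertAngle a) step 1000) =
      ((if -180 < a ∧ a < 0 then a else PySem.Int.mod a 360) -
         PySem.Int.floordiv ((if -180 < a ∧ a < 0 then a else PySem.Int.mod a 360) + 180) step * step,
       (if -180 < a ∧ a < 0 then a else PySem.Int.mod a 360) +
         max 0 (PySem.Int.floordiv (180 - (if -180 < a ∧ a < 0 then a else PySem.Int.mod a 360)) step) * step)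
  rw [← pvConvertAngle_eq]
  exact pvScanPair_eq (pvConvertAngle a) step hs hb.1 hb.2
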